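-- pv_equiv track=rewrite | github.com/bilbisli/research_methods_parallel_DDIFMAS | Paper/methods_for_diagnosis.py | ones_not_subset_in_spectra
-- ===== SOURCE A (Python) =====
-- def ones_not_subset_in_spectra(conf, local_spectrum):
--     conf_ones_indices = [ci for ci, c in enumerate(conf) if c == 1]
--     conf_ones_indices_set = set(conf_ones_indices)
--     for row in local_spectrum:
--         row_ones_indices = [ci for ci, c in enumerate(row) if c == 1]
--         row_ones_indices_set = set(row_ones_indices)
--         if conf_ones_indices_set.issubset(row_ones_indices_set):
--             return False
--     return True
-- ===== SOURCE B (Python) =====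
-- def ones_not_subset_in_spectra(conf, local_spectrum):
--     ones = [ci for ci, c in enumerate(conf) if c == 1]
--     candidates = list(range(len(local_spectrum)))
--     for i in ones:
--         candidates = [r for r in candidates
--                       if i < len(local_spectrum[r]) and local_spectrum[r][i] == 1]
--         if not candidates:
--             return True
--     return not candidates
-- ===== Notes on version B (the rewrite author's own statement) =====
-- stated objective: alternative
-- what changed: Instead of testing each row's full set of one-positions for superset-ness of conf's ones, B walks conf's one-columns once, maintaining a shrinking list of candidate row indices (rows with a 1 in every conf-one column seen so far) and exits early when no candidate survives.
import Mathlib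
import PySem

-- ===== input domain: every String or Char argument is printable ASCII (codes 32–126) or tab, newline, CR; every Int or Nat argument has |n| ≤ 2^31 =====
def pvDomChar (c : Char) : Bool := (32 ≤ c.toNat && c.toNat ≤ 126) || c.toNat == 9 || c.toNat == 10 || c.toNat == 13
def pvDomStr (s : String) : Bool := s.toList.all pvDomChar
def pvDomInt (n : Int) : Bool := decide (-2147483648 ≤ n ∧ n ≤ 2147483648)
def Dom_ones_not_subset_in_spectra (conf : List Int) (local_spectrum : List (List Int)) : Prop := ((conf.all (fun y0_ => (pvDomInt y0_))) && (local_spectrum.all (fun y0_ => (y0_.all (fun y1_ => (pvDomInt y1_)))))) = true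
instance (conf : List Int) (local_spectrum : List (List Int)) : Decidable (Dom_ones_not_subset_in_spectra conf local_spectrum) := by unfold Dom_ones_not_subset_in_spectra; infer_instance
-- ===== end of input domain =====

-- B re-implements the check column-wise with a shrinking candidate-row list instead of a
-- per-row superset test; same return value everywhere ('alternative', no speed claim).

-- ===== PORT A =====
-- [ci for ci, c in enumerate(xs) if c == 1]
def pvOnesIdx (xs : List Int) : List Int :=
  (PySem.List.enumerate xs 0).filterMap (fun p => if p.2 = 1 then some p.1 else none)

-- the for-loop of A: first row whose one-set contains conf's one-set → False, else True
def pvGoA (confSet : PySem.Set Int) : List (List Int) → Bool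
  | [] => true
  | row :: rest =>
    let rowSet := PySem.Set.ofList (pvOnesIdx row)
    if PySem.Set.issubset confSet rowSet then false else pvGoA confSet rest

def ones_not_subset_in_spectra (conf : List Int) (local_spectrum : List (List Int)) : Bool :=
  let confSet := PySem.Set.ofList (pvOnesIdx conf)
  pvGoA confSet local_spectrum

-- ===== PORT B =====
-- guard of B's comprehension: i < len(local_spectrum[r]) and local_spectrum[r][i] == 1
def pvColOne (ls : List (List Int)) (i : Int) (r : Nat) : Bool :=
  let row := ls.getD r []
  decide (i < (row.length : Int)) && (PySem.List.pyGetD row i 0 == 1)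

-- the for-loop of B over conf's one-columns, shrinking the candidate-row list
def pvGoB (ls : List (List Int)) : List Int → List Nat → Bool
  | [], cands => cands.isEmpty
  | i :: rest, cands =>
    let c' := cands.filter (fun r => pvColOne ls i r)
    if c'.isEmpty then true else pvGoB ls rest c'

def ones_not_subset_in_spectra_alt (conf : List Int) (local_spectrum : List (List Int)) : Bool :=
  pvGoB local_spectrum (pvOnesIdx conf) (List.range local_spectrum.length)

-- ===== PRECONDITION & SPEC =====
def Spec_ones_not_subset_in_spectra (conf : List Int) (local_spectrum : List (List Int)) (out : Bool) : Prop := out = ones_not_subset_in_spectra_alt conf local_spectrum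
instance (conf : List Int) (local_spectrum : List (List Int)) (out : Bool) : Decidable (Spec_ones_not_subset_in_spectra conf local_spectrum out) := by unfold Spec_ones_not_subset_in_spectra; infer_instance

-- ===== CLAIM (what is proved, stated in full; the proofs are below) =====
def Claim_equal_ones_not_subset_in_spectra : Prop := ∀ (conf : List Int) (local_spectrum : List (List Int)), Dom_ones_not_subset_in_spectra conf local_spectrum → Spec_ones_not_subset_in_spectra conf local_spectrum (ones_not_subset_in_spectra conf local_spectrum)

-- ===== LEMMAS AND PROOFS =====

theorem mem_pvOnesIdx (xs : List Int) (i : Int) :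
    i ∈ pvOnesIdx xs ↔ ∃ k : Nat, ∃ h : k < xs.length, i = (k : Int) ∧ xs[k] = 1 := by
  simp only [pvOnesIdx, List.mem_filterMap, PySem.List.mem_enumerate_iff]
  constructor
  · rintro ⟨p, ⟨k, hk, rfl⟩, hp⟩
    simp only [zero_add] at hp ⊢
    split at hp
    · exact ⟨k, hk, by simpa using hp.symm, by assumption⟩
    · simp at hp
  · rintro ⟨k, hk, rfl, h1⟩
    exact ⟨((k : Int), xs[k]), ⟨k, hk, by simp⟩, by simp [h1]⟩

theorem pvGoB_eq (ls : List (List Int)) (ones : List Int) (cands : List Nat) :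
    pvGoB ls ones cands = (cands.filter (fun r => ones.all (fun i => pvColOne ls i r))).isEmpty := by
  induction ones generalizing cands with
  | nil => simp [pvGoB]
  | cons i rest ih =>
    simp only [pvGoB, ih]
    have hff : cands.filter (fun r => (i :: rest).all (fun j => pvColOne ls j r))
        = (cands.filter (fun r => pvColOne ls i r)).filter
            (fun r => rest.all (fun j => pvColOne ls j r)) := by
      rw [List.filter_filter]
      simp only [List.all_cons]
      exact List.filter_congr (fun r _ => by rw [Bool.and_comm])
    rw [hff]
    split
    · next h => rw [List.isEmpty_iff.mp h]; simp
    · rfl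

theorem pvGoA_eq (confSet : PySem.Set Int) (ls : List (List Int)) :
    pvGoA confSet ls
      = ls.all (fun row => !(PySem.Set.issubset confSet (PySem.Set.ofList (pvOnesIdx row)))) := by
  induction ls with
  | nil => simp [pvGoA]
  | cons row rest ih =>
    simp only [pvGoA, List.all_cons, ih]
    split
    · next h => simp [h]
    · next h => rw [Bool.eq_false_iff.mpr h]; simp

-- ===== VERDICT (by name: the statement is the Claim_ definition above) =====
theorem pvRow_iff (ls : List (List Int)) (r : Nat) (hr : r < ls.length) (conf : List Int) :
    (PySem.Set.issubset (PySem.Set.ofList (pvOnesIdx conf))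
        (PySem.Set.ofList (pvOnesIdx ls[r])) = true)
      ↔ (∀ i ∈ pvOnesIdx conf, pvColOne ls i r = true) := by
  simp only [PySem.Set.issubset, List.all_eq_true, PySem.Set.mem_ofList]
  constructor <;> intro h i hi
  · have hi' := h i hi
    obtain ⟨k, hk, rfl, h1⟩ := (mem_pvOnesIdx conf i).mp hi
    have hm : (k : Int) ∈ pvOnesIdx ls[r] := by simpa using hi'
    obtain ⟨k', hk', hkk, h1'⟩ := (mem_pvOnesIdx _ _).mp hm
    have : k' = k := by exact_mod_cast hkk.symm
    subst this
    simp [pvColOne, List.getD_eq_getElem?_getD, hr, PySem.List.pyGetD_natCast, hk', h1']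
  · have hc := h i hi
    obtain ⟨k, hk, rfl, h1⟩ := (mem_pvOnesIdx conf i).mp hi
    simp only [pvColOne, List.getD_eq_getElem?_getD, PySem.List.pyGetD_natCast,
      Bool.and_eq_true, decide_eq_true_eq, beq_iff_eq] at hc
    simp only [List.getElem?_eq_getElem hr, Option.getD_some] at hc
    obtain ⟨hlt, hval⟩ := hc
    have hklt : k < ls[r].length := by exact_mod_cast hlt
    have hmem : (k : Int) ∈ pvOnesIdx ls[r] := by
      refine (mem_pvOnesIdx _ _).mpr ⟨k, hklt, rfl, ?_⟩
      rw [List.getElem?_eq_getElem hklt] at hval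
      simpa using hval
    simpa using hmem

theorem ones_not_subset_in_spectra_spec : Claim_equal_ones_not_subset_in_spectra := by
  intro conf ls _
  show _ = _
  unfold ones_not_subset_in_spectra ones_not_subset_in_spectra_alt
  rw [pvGoA_eq, pvGoB_eq, Bool.eq_iff_iff]
  simp only [List.all_eq_true, List.isEmpty_iff, List.filter_eq_nil_iff, List.mem_range,
    Bool.not_eq_eq_eq_not, Bool.not_true, Bool.eq_false_iff, ne_eq]
  constructor
  · intro h r hr hall
    exact h ls[r] (List.getElem_mem hr) ((pvRow_iff ls r hr conf).mpr hall)
  · intro h row hrow hsub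
    obtain ⟨r, hr, rfl⟩ := List.mem_iff_getElem.mp hrow
    exact h r hr ((pvRow_iff ls r hr conf).mp hsub)
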